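-- pv_equiv track=rewrite | github.com/diogokeeper12/RandomCode | LABSII/Treino1/cruzamentos.py | cruzamentos
-- ===== SOURCE A (Python) =====
-- def cruzamentos(ruas):
--     res = {}
--     for rua in ruas:
--         if rua[0] not in res:
--             res[rua[0]] = 0
--         if rua[-1] not in res:
--             res[rua[-1]] = 0
--         if rua[0] in res:
--             if rua[0] == rua[-1]:
--                 res[rua[0]] += 1
--             else:
--                 res[rua[0]] += 1
--                 res[rua[-1]] += 1
--     x = sorted(res.items(), key=lambda x:(x[1],x[0]))
--     return x
-- ===== SOURCE B (Python) =====
-- def cruzamentos(ruas):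
--     pontos = []
--     for rua in ruas:
--         pontos.append(rua[0])
--         if rua[-1] != rua[0]:
--             pontos.append(rua[-1])
--     pontos.sort()
--     pares = []
--     for nome in pontos:
--         if pares and pares[-1][0] == nome:
--             pares[-1] = (nome, pares[-1][1] + 1)
--         else:
--             pares.append((nome, 1))
--     return sorted(pares, key=lambda t: (t[1], t[0]))
-- ===== Notes on version B (the rewrite author's own statement) =====
-- stated objective: alternative
-- what changed: Replaces A's hash-map tallying (setdefault-then-increment per street into a dict) by sort-then-group counting: flatten the endpoints into one list, sort it, collapse consecutive equal names into (name, run length) pairs in a single scan, then sort the pairs by (count, name).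
import Mathlib
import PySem

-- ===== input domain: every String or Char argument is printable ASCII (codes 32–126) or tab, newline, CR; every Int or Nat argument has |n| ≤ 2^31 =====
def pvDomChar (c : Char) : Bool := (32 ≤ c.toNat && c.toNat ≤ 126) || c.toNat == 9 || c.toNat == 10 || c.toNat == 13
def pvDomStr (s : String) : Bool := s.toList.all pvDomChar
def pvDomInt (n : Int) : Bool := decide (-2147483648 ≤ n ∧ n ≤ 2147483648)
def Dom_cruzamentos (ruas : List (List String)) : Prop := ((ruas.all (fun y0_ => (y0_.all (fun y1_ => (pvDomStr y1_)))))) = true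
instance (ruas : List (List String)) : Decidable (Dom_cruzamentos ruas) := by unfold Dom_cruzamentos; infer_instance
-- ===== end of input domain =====

-- B replaces A's dict tallying by sort-then-group counting: flatten the endpoints, sort, collapse
-- consecutive equal names into (name, run length) pairs in one scan, then sort by (count, name).

-- ===== PORT A =====
-- the body of A's 'for rua in ruas' loop over the dict 'res' (rua[0]/rua[-1] total under Pre_, which excludes empty streets)
def cruzStepA (res : PySem.Dict String Int) (rua : List String) : PySem.Dict String Int :=
  let res := if res.contains (PySem.List.pyGetD rua 0 "") = false then res.insert (PySem.List.pyGetD rua 0 "") 0 else res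
  let res := if res.contains (PySem.List.pyGetD rua (-1) "") = false then res.insert (PySem.List.pyGetD rua (-1) "") 0 else res
  if res.contains (PySem.List.pyGetD rua 0 "") = true then
    if PySem.List.pyGetD rua 0 "" = PySem.List.pyGetD rua (-1) "" then
      res.modify (PySem.List.pyGetD rua 0 "") 0 (· + 1)
    else
      let res := res.modify (PySem.List.pyGetD rua 0 "") 0 (· + 1)
      res.modify (PySem.List.pyGetD rua (-1) "") 0 (· + 1)
  else res

def cruzamentos (ruas : List (List String)) : List (String × Int) :=
  let res := ruas.foldl cruzStepA PySem.Dict.empty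
  PySem.List.sorted2 res.items (fun x => x.2) (fun x => x.1) false

-- ===== PORT B =====
-- the body of B's endpoint-collecting loop (append rua[0]; append rua[-1] when different)
def cruzPontoStep (pontos : List String) (rua : List String) : List String :=
  let pontos := pontos ++ [PySem.List.pyGetD rua 0 ""]
  if PySem.List.pyGetD rua (-1) "" ≠ PySem.List.pyGetD rua 0 "" then
    pontos ++ [PySem.List.pyGetD rua (-1) ""]
  else pontos

-- the body of B's grouping loop: extend the last run or open a new one
def cruzRunStep (pares : List (String × Int)) (nome : String) : List (String × Int) :=
  match pares.getLast? with
  | some (k, c) => if k = nome then pares.dropLast ++ [(nome, c + 1)] else pares ++ [(nome, 1)]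
  | none => pares ++ [(nome, 1)]

def cruzamentos_alt (ruas : List (List String)) : List (String × Int) :=
  let pontos := ruas.foldl cruzPontoStep []
  let pontos := PySem.List.sorted pontos (fun x => x) false
  let pares := pontos.foldl cruzRunStep []
  PySem.List.sorted2 pares (fun p => p.2) (fun p => p.1) false

-- ===== PRECONDITION & SPEC =====
-- Pre_ excludes inputs containing an empty street, on which A raises IndexError at rua[0].
def Pre_cruzamentos (ruas : List (List String)) : Prop := ∀ rua ∈ ruas, rua ≠ []
instance (ruas : List (List String)) : Decidable (Pre_cruzamentos ruas) := by unfold Pre_cruzamentos; infer_instance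
def pvWitness_cruzamentos : List (List String) := [["a", "b"], ["b", "c"], ["c"]]

def Spec_cruzamentos (ruas : List (List String)) (out : List (String × Int)) : Prop := out = cruzamentos_alt ruas
instance (ruas : List (List String)) (out : List (String × Int)) : Decidable (Spec_cruzamentos ruas out) := by unfold Spec_cruzamentos; infer_instance

-- ===== CLAIM (what is proved, stated in full; the proofs are below) =====
def Claim_equal_cruzamentos : Prop := ∀ (ruas : List (List String)), Dom_cruzamentos ruas → Pre_cruzamentos ruas → Spec_cruzamentos ruas (cruzamentos ruas)

-- ===== LEMMAS AND PROOFS =====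

-- the two endpoints a street contributes (one entry when first = last), and its abstract form
def cruzEnds (rua : List String) : List String :=
  PySem.List.pyGetD rua 0 "" ::
    (if PySem.List.pyGetD rua (-1) "" ≠ PySem.List.pyGetD rua 0 "" then [PySem.List.pyGetD rua (-1) ""] else [])

def genEnds (a b : String) : List String := a :: (if b ≠ a then [b] else [])

-- A's loop body with the two endpoints abstracted as variables (defeq to cruzStepA)
def cruzGen (d : PySem.Dict String Int) (a b : String) : PySem.Dict String Int :=
  let d1 := if d.contains a = false then d.insert a 0 else d
  let d2 := if d1.contains b = false then d1.insert b 0 else d1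
  if d2.contains a = true then
    if a = b then d2.modify a 0 (· + 1)
    else (d2.modify a 0 (· + 1)).modify b 0 (· + 1)
  else d2

-- 'if k not in d: d[k] = 0' as one operation
def ensure (d : PySem.Dict String Int) (k : String) : PySem.Dict String Int :=
  if d.contains k = false then d.insert k 0 else d

theorem contains_keys (d : PySem.Dict String Int) (k : String) :
    PySem.Set.contains d.keys k = d.contains k := by
  by_cases hm : k ∈ d.keys <;>
    simp [PySem.Set.contains, PySem.Dict.contains_eq_decide_mem_keys, hm]

theorem ensure_getD (d : PySem.Dict String Int) (k v : String) :
    (ensure d k).getD v 0 = d.getD v 0 := by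
  unfold ensure
  by_cases h : d.contains k = false
  · rw [if_pos h, PySem.Dict.getD_insert]
    split_ifs with hv
    · subst hv; exact (PySem.Dict.getD_of_not_contains d 0 h).symm
    · rfl
  · rw [if_neg h]

theorem ensure_contains_self (d : PySem.Dict String Int) (k : String) :
    (ensure d k).contains k = true := by
  unfold ensure
  by_cases h : d.contains k = false
  · rw [if_pos h]; exact PySem.Dict.contains_insert_self d k 0
  · rw [if_neg h]; simpa using h

theorem ensure_contains_of_ne (d : PySem.Dict String Int) {k k' : String} (h : k' ≠ k) :
    (ensure d k).contains k' = d.contains k' := by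
  unfold ensure
  by_cases hc : d.contains k = false
  · rw [if_pos hc, PySem.Dict.contains_insert]
    simp [h]
  · rw [if_neg hc]

theorem ensure_keys (d : PySem.Dict String Int) (k : String) :
    (ensure d k).keys = PySem.Set.add d.keys k := by
  unfold ensure PySem.Set.add
  rw [contains_keys]
  by_cases h : d.contains k = false
  · rw [if_pos h, PySem.Dict.keys_insert_of_not_contains d 0 h, if_neg (by simp [h])]
  · have h' : d.contains k = true := by simpa using h
    rw [if_neg h, if_pos h']

theorem bump_getD (d : PySem.Dict String Int) (k v : String) :
    (d.modify k 0 (· + 1)).getD v 0 = d.getD v 0 + (if v = k then 1 else 0) := by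
  rw [PySem.Dict.getD_modify]
  split_ifs with h
  · subst h; rfl
  · omega

theorem bump_keys (d : PySem.Dict String Int) (k : String) (h : d.contains k = true) :
    (d.modify k 0 (· + 1)).keys = d.keys := by
  rw [PySem.Dict.keys_modify, PySem.Dict.keys_insert_of_contains d _ h]

theorem cruzGen_shape (d : PySem.Dict String Int) (a b : String) :
    cruzGen d a b =
      if a = b then (ensure (ensure d a) b).modify a 0 (· + 1)
      else ((ensure (ensure d a) b).modify a 0 (· + 1)).modify b 0 (· + 1) := by
  have hca : (ensure (ensure d a) b).contains a = true := by
    by_cases hab : a = b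
    · subst hab; exact ensure_contains_self (ensure d a) a
    · rw [ensure_contains_of_ne _ hab]
      exact ensure_contains_self d a
  show (if (ensure (ensure d a) b).contains a = true then
          if a = b then (ensure (ensure d a) b).modify a 0 (· + 1)
          else ((ensure (ensure d a) b).modify a 0 (· + 1)).modify b 0 (· + 1)
        else ensure (ensure d a) b) = _
  rw [if_pos hca]

theorem cruzGen_getD (d : PySem.Dict String Int) (a b v : String) :
    (cruzGen d a b).getD v 0 = d.getD v 0 + ((genEnds a b).count v : Int) := by
  rw [cruzGen_shape]
  by_cases hab : a = b
  · subst hab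
    rw [if_pos rfl, bump_getD, ensure_getD, ensure_getD]
    simp only [genEnds, ne_eq, not_true_eq_false, if_false]
    have hcount : ((([a].count v : Nat)) : Int) = if v = a then 1 else 0 := by
      simp only [List.count_cons, List.count_nil]
      push_cast
      split_ifs <;> simp_all
    rw [hcount]
  · rw [if_neg hab, bump_getD, bump_getD, ensure_getD, ensure_getD]
    have hba : b ≠ a := fun h => hab h.symm
    simp only [genEnds, if_pos hba]
    have hcount : ((((a :: [b]).count v : Nat)) : Int)
        = (if v = a then 1 else 0) + (if v = b then 1 else 0) := by
      simp only [List.count_cons, List.count_nil]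
      push_cast
      split_ifs <;> simp_all
    rw [hcount]
    ring

theorem set_add_add_self (s : PySem.Set String) (x : String) :
    PySem.Set.add (PySem.Set.add s x) x = PySem.Set.add s x := by
  by_cases h : PySem.Set.contains s x = true
  · have hs : PySem.Set.add s x = s := by unfold PySem.Set.add; rw [if_pos h]
    rw [hs, hs]
  · have hs : PySem.Set.add s x = s ++ [x] := by unfold PySem.Set.add; rw [if_neg h]
    rw [hs]
    unfold PySem.Set.add
    rw [if_pos (by simp [PySem.Set.contains])]

theorem cruzGen_keys (d : PySem.Dict String Int) (a b : String) :
    (cruzGen d a b).keys = PySem.Set.update d.keys (genEnds a b) := by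
  rw [cruzGen_shape]
  by_cases hab : a = b
  · subst hab
    rw [if_pos rfl, bump_keys _ _ (by
        rw [ensure_contains_self]), ensure_keys, ensure_keys]
    simp only [genEnds, if_neg (by simp : ¬(a ≠ a)), PySem.Set.update, List.foldl_cons,
      List.foldl_nil]
    exact set_add_add_self d.keys a
  · have hba : b ≠ a := fun h => hab h.symm
    have hca : (ensure (ensure d a) b).contains a = true := by
      rw [ensure_contains_of_ne _ hab]
      exact ensure_contains_self d a
    have hcb : ((ensure (ensure d a) b).modify a 0 (· + 1)).contains b = true := by
      rw [PySem.Dict.contains_modify]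
      simp [ensure_contains_self]
    rw [if_neg hab, bump_keys _ _ hcb, bump_keys _ _ hca, ensure_keys, ensure_keys]
    simp [genEnds, hba, PySem.Set.update]

theorem cruzStepA_eq_gen (d : PySem.Dict String Int) (rua : List String) :
    cruzStepA d rua = cruzGen d (PySem.List.pyGetD rua 0 "") (PySem.List.pyGetD rua (-1) "") := rfl

theorem cruzEnds_eq_gen (rua : List String) :
    cruzEnds rua = genEnds (PySem.List.pyGetD rua 0 "") (PySem.List.pyGetD rua (-1) "") := rfl

theorem cruzStepA_getD (d : PySem.Dict String Int) (rua : List String) (v : String) :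
    (cruzStepA d rua).getD v 0 = d.getD v 0 + ((cruzEnds rua).count v : Int) := by
  rw [cruzStepA_eq_gen, cruzEnds_eq_gen]
  exact cruzGen_getD d _ _ v

theorem cruzStepA_keys (d : PySem.Dict String Int) (rua : List String) :
    (cruzStepA d rua).keys = PySem.Set.update d.keys (cruzEnds rua) := by
  rw [cruzStepA_eq_gen, cruzEnds_eq_gen]
  exact cruzGen_keys d _ _

theorem cruzPontoStep_eq (pontos rua : List String) :
    cruzPontoStep pontos rua = pontos ++ cruzEnds rua := by
  simp only [cruzPontoStep, cruzEnds]
  split_ifs <;> simp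

theorem pontos_eq_flatMap (ruas : List (List String)) (acc : List String) :
    ruas.foldl cruzPontoStep acc = acc ++ ruas.flatMap cruzEnds := by
  induction ruas generalizing acc with
  | nil => simp
  | cons r t ih => simp [List.foldl_cons, cruzPontoStep_eq, ih]

theorem loopA_getD (ruas : List (List String)) (d : PySem.Dict String Int) (v : String) :
    (ruas.foldl cruzStepA d).getD v 0 = d.getD v 0 + ((ruas.flatMap cruzEnds).count v : Int) := by
  induction ruas generalizing d with
  | nil => simp
  | cons r t ih =>
    rw [List.foldl_cons, ih, cruzStepA_getD]
    simp only [List.flatMap_cons, List.count_append]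
    push_cast
    ring

theorem loopA_keys (ruas : List (List String)) (d : PySem.Dict String Int) :
    (ruas.foldl cruzStepA d).keys = PySem.Set.update d.keys (ruas.flatMap cruzEnds) := by
  induction ruas generalizing d with
  | nil => simp [PySem.Set.update]
  | cons r t ih =>
    rw [List.foldl_cons, ih, cruzStepA_keys]
    simp only [List.flatMap_cons, PySem.Set.update, List.foldl_append]

-- ===== B-side lemmas: the grouping fold computes run-length encoding of the sorted list =====

-- recursive description of B's grouping fold: current run (cur, n), remaining input
def runsGo (cur : String) (n : Int) : List String → List (String × Int)
  | [] => [(cur, n)]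
  | y :: t => if y = cur then runsGo cur (n + 1) t else (cur, n) :: runsGo y 1 t

def runs : List String → List (String × Int)
  | [] => []
  | x :: t => runsGo x 1 t

theorem foldl_cruzRunStep (l : List String) (P : List (String × Int)) (cur : String) (n : Int) :
    l.foldl cruzRunStep (P ++ [(cur, n)]) = P ++ runsGo cur n l := by
  induction l generalizing P cur n with
  | nil => simp [runsGo]
  | cons y t ih =>
    rw [List.foldl_cons]
    have hstep : cruzRunStep (P ++ [(cur, n)]) y
        = if y = cur then P ++ [(cur, n + 1)] else (P ++ [(cur, n)]) ++ [(y, 1)] := by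
      simp only [cruzRunStep, List.getLast?_concat, List.dropLast_concat]
      by_cases h : cur = y
      · subst h; simp
      · rw [if_neg h, if_neg (fun hy => h hy.symm)]
    rw [hstep]
    by_cases h : y = cur
    · rw [if_pos h, ih, h]
      simp [runsGo]
    · rw [if_neg h, ih (P ++ [(cur, n)]) y 1]
      simp [runsGo, h]

theorem foldl_cruzRunStep_nil (l : List String) :
    l.foldl cruzRunStep [] = runs l := by
  cases l with
  | nil => rfl
  | cons x t =>
    rw [List.foldl_cons]
    have h0 : cruzRunStep [] x = [] ++ [(x, 1)] := by simp [cruzRunStep]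
    rw [h0, foldl_cruzRunStep]
    rfl

-- first occurrence of each run of a list (the names of its run-length encoding)
def uniq : List String → List String
  | [] => []
  | x :: t => x :: uniq (t.dropWhile (· == x))
termination_by l => l.length
decreasing_by
  have h := List.length_dropWhile_le (· == x) t
  simp only [List.length_cons]
  omega

theorem lt_of_mem_dropWhile (x : String) (t : List String)
    (hp : t.Pairwise (· ≤ ·)) (hcur : ∀ y ∈ t, x ≤ y) :
    ∀ z ∈ t.dropWhile (· == x), x < z := by
  induction t with
  | nil => simp
  | cons y t' ih =>
    rw [List.pairwise_cons] at hp
    by_cases h : y = x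
    · rw [List.dropWhile_cons_of_pos (by simp [h])]
      exact ih hp.2 (fun z hz => hcur z (List.mem_cons_of_mem _ hz))
    · rw [List.dropWhile_cons_of_neg (by simp [h])]
      intro z hz
      have hxy : x < y := lt_of_le_of_ne (hcur y (List.mem_cons_self)) (fun he => h he.symm)
      rcases List.mem_cons.mp hz with rfl | hz'
      · exact hxy
      · exact lt_of_lt_of_le hxy (hp.1 z hz')

theorem runsGo_eq (t : List String) (cur : String) (n : Int)
    (hp : t.Pairwise (· ≤ ·)) (hcur : ∀ y ∈ t, cur ≤ y) :
    runsGo cur n t = (cur, n + (t.count cur : Int)) :: runs (t.dropWhile (· == cur)) := by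
  induction t generalizing n with
  | nil => simp [runsGo, runs]
  | cons y t' ih =>
    rw [List.pairwise_cons] at hp
    by_cases h : y = cur
    · rw [show runsGo cur n (y :: t') = runsGo cur (n + 1) t' from by simp [runsGo, h],
        ih (n + 1) hp.2 (fun z hz => hcur z (List.mem_cons_of_mem _ hz)),
        List.dropWhile_cons_of_pos (by simp [h]), h, List.count_cons_self]
      push_cast
      ring_nf
    · have hne : cur ∉ y :: t' := by
        intro hm
        rcases List.mem_cons.mp hm with he | hm'
        · exact h he.symm
        · exact h (le_antisymm (hp.1 cur hm') (hcur y List.mem_cons_self))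
      rw [show runsGo cur n (y :: t') = (cur, n) :: runsGo y 1 t' from by simp [runsGo, h],
        List.dropWhile_cons_of_neg (by simp [h])]
      have hc : ((y :: t').count cur : Int) = 0 := by
        rw [List.count_eq_zero.mpr hne]; rfl
      rw [hc]
      simp [runs]

theorem mem_of_mem_uniq (l : List String) (a : String) (h : a ∈ uniq l) : a ∈ l := by
  induction l using uniq.induct with
  | case1 => simp [uniq] at h
  | case2 x t ih =>
    rw [uniq] at h
    rcases List.mem_cons.mp h with rfl | h'
    · exact List.mem_cons_self
    · exact List.mem_cons_of_mem _ ((List.dropWhile_sublist _).subset (ih h'))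

theorem nodup_uniq (l : List String) (hp : l.Pairwise (· ≤ ·)) : (uniq l).Nodup := by
  induction l using uniq.induct with
  | case1 => simp [uniq]
  | case2 x t ih =>
    rw [List.pairwise_cons] at hp
    rw [uniq, List.nodup_cons]
    refine ⟨fun hm => ?_, ih (hp.2.sublist (List.dropWhile_sublist _))⟩
    have := lt_of_mem_dropWhile x t hp.2 hp.1 x (mem_of_mem_uniq _ _ hm)
    exact absurd this (lt_irrefl x)

theorem mem_uniq_iff (l : List String) (hp : l.Pairwise (· ≤ ·)) (a : String) :
    a ∈ uniq l ↔ a ∈ l := by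
  induction l using uniq.induct with
  | case1 => simp [uniq]
  | case2 x t ih =>
    rw [List.pairwise_cons] at hp
    rw [uniq, List.mem_cons, List.mem_cons,
      ih (hp.2.sublist (List.dropWhile_sublist _))]
    constructor
    · rintro (rfl | h')
      · exact Or.inl rfl
      · exact Or.inr ((List.dropWhile_sublist _).subset h')
    · rintro (rfl | h')
      · exact Or.inl rfl
      · rw [← List.takeWhile_append_dropWhile (p := (· == x)) (l := t)] at h'
        rcases List.mem_append.mp h' with h1 | h2
        · exact Or.inl (by simpa using List.mem_takeWhile_imp h1)
        · exact Or.inr h2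

theorem runs_eq (l : List String) (hp : l.Pairwise (· ≤ ·)) :
    runs l = (uniq l).map (fun k => (k, (l.count k : Int))) := by
  induction l using uniq.induct with
  | case1 => simp [runs, uniq]
  | case2 x t ih =>
    rw [List.pairwise_cons] at hp
    have hps : (t.dropWhile (· == x)).Pairwise (· ≤ ·) := hp.2.sublist (List.dropWhile_sublist _)
    rw [show runs (x :: t) = runsGo x 1 t from rfl,
      runsGo_eq t x 1 hp.2 hp.1, ih hps, uniq, List.map_cons]
    congr 1
    · have : ((x :: t).count x : Int) = 1 + (t.count x : Int) := by
        rw [List.count_cons_self]; push_cast; ring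
      rw [this]
    · refine List.map_congr_left fun k hk => ?_
      have hks : k ∈ t.dropWhile (· == x) := mem_of_mem_uniq _ _ hk
      have hxk : x < k := lt_of_mem_dropWhile x t hp.2 hp.1 k hks
      have hne : k ≠ x := ne_of_gt hxk
      have h0 : (t.takeWhile (· == x)).count k = 0 := by
        rw [List.count_eq_zero]
        intro hm
        exact hne (by simpa using List.mem_takeWhile_imp hm)
      have hcount : (x :: t).count k = (t.dropWhile (· == x)).count k := by
        calc (x :: t).count k = t.count k := by simp [Ne.symm hne]
          _ = (t.takeWhile (· == x)).count k + (t.dropWhile (· == x)).count k := by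
                conv_lhs => rw [← List.takeWhile_append_dropWhile (p := (· == x)) (l := t)]
                rw [List.count_append]
          _ = _ := by omega
      rw [hcount]

-- ===== final-sort lemmas =====

theorem sorted2_eq_sorted_lex (xs : List (String × Int)) :
    PySem.List.sorted2 xs (fun p => p.2) (fun p => p.1) false
      = PySem.List.sorted xs (fun p => toLex (p.2, p.1)) false := by
  simp only [PySem.List.sorted2, PySem.List.sorted, Bool.false_eq_true, if_false]
  have h : (fun (a b : String × Int) => decide (a.2 < b.2) || (!decide (b.2 < a.2) && decide (a.1 < b.1)))
      = fun a b => decide (toLex (a.2, a.1) < toLex (b.2, b.1)) := by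
    funext p q
    by_cases h1 : p.2 < q.2 <;> by_cases h2 : q.2 < p.2 <;> by_cases h3 : p.1 < q.1 <;>
      simp [Prod.Lex.lt_iff, h1, h2, h3] <;> omega
  simp only [h]

theorem key_lex_injective : Function.Injective (fun p : String × Int => toLex (p.2, p.1)) := by
  intro p q h
  have h2 : (p.2, p.1) = (q.2, q.1) := toLex.injective h
  have h3 := Prod.ext_iff.mp h2
  exact Prod.ext h3.2 h3.1

theorem sorted2_eq_of_perm (xs ys : List (String × Int)) (h : xs.Perm ys) :
    PySem.List.sorted2 xs (fun p => p.2) (fun p => p.1) false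
      = PySem.List.sorted2 ys (fun p => p.2) (fun p => p.1) false := by
  rw [sorted2_eq_sorted_lex, sorted2_eq_sorted_lex]
  exact PySem.List.sorted_eq_sorted_of_perm _ _ _ key_lex_injective h

-- ===== VERDICT (by name: the statement is the Claim_ definition above) =====
theorem cruzamentos_spec : Claim_equal_cruzamentos := by
  intro ruas _ _
  show cruzamentos ruas = cruzamentos_alt ruas
  have hpontos : ruas.foldl cruzPontoStep [] = ruas.flatMap cruzEnds := by
    simpa using pontos_eq_flatMap ruas []
  have hperm : (PySem.List.sorted (ruas.flatMap cruzEnds) (fun x => x) false).Perm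
      (ruas.flatMap cruzEnds) := PySem.List.sorted_perm _ _ _
  have hpair : (PySem.List.sorted (ruas.flatMap cruzEnds) (fun x => x) false).Pairwise (· ≤ ·) :=
    PySem.List.sorted_pairwise _ _
  have hkeys : (ruas.foldl cruzStepA PySem.Dict.empty).keys
      = PySem.Set.ofList (ruas.flatMap cruzEnds) := by
    rw [loopA_keys, PySem.Set.ofList_eq_foldl]
    rfl
  have hnodup : (ruas.foldl cruzStepA PySem.Dict.empty).keys.Nodup := by
    rw [hkeys]; exact PySem.Set.nodup_ofList _
  have hitems : (ruas.foldl cruzStepA PySem.Dict.empty).items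
      = (PySem.Set.ofList (ruas.flatMap cruzEnds)).map
          (fun k => (k, ((ruas.flatMap cruzEnds).count k : Int))) := by
    rw [PySem.Dict.items_eq_map_keys _ hnodup 0, hkeys]
    refine List.map_congr_left fun k _ => ?_
    rw [loopA_getD]
    simp
  have hruns : (PySem.List.sorted (ruas.flatMap cruzEnds) (fun x => x) false).foldl cruzRunStep []
      = (uniq (PySem.List.sorted (ruas.flatMap cruzEnds) (fun x => x) false)).map
          (fun k => (k, ((ruas.flatMap cruzEnds).count k : Int))) := by
    rw [foldl_cruzRunStep_nil, runs_eq _ hpair]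
    exact List.map_congr_left fun k _ => by rw [hperm.count_eq]
  have hnperm : (uniq (PySem.List.sorted (ruas.flatMap cruzEnds) (fun x => x) false)).Perm
      (PySem.Set.ofList (ruas.flatMap cruzEnds)) := by
    rw [List.perm_ext_iff_of_nodup (nodup_uniq _ hpair) (PySem.Set.nodup_ofList _)]
    intro a
    rw [mem_uniq_iff _ hpair, PySem.List.mem_sorted, PySem.Set.mem_ofList]
  show PySem.List.sorted2 (ruas.foldl cruzStepA PySem.Dict.empty).items
        (fun x => x.2) (fun x => x.1) false
      = PySem.List.sorted2
          ((PySem.List.sorted (ruas.foldl cruzPontoStep []) (fun x => x) false).foldl cruzRunStep [])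
          (fun p => p.2) (fun p => p.1) false
  rw [hpontos, hitems, hruns]
  exact (sorted2_eq_of_perm _ _ (hnperm.map _)).symm
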